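-- pv_equiv track=rewrite | github.com/vinchinzu/euler | python/830.py | compute_binom_mod
-- ===== SOURCE A (Python) =====
-- def compute_binom_mod(n, m, mod):
--     if m == 0:
--         return 1 % mod
--     res = 1
--     for i in range(1, m + 1):
--         res *= (n - m + i)
--         res //= i
--     return res % mod
-- ===== SOURCE B (Python) =====
-- def compute_binom_mod(n, m, mod):
--     num = 1
--     for k in range(n - m + 1, n + 1):
--         num *= k
--     den = 1
--     for k in range(1, m + 1):
--         den *= k
--     return (num // den) % mod
-- ===== Notes on version B (the rewrite author's own statement) =====
-- stated objective: simpler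
-- what changed: A interleaves a multiply and a floor-division inside one loop maintaining a running binomial; B computes the numerator product n-m+1..n and the factorial denominator in two separate plain product loops and performs a single exact division at the end, which also removes A's special case for m == 0.
import Mathlib
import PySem

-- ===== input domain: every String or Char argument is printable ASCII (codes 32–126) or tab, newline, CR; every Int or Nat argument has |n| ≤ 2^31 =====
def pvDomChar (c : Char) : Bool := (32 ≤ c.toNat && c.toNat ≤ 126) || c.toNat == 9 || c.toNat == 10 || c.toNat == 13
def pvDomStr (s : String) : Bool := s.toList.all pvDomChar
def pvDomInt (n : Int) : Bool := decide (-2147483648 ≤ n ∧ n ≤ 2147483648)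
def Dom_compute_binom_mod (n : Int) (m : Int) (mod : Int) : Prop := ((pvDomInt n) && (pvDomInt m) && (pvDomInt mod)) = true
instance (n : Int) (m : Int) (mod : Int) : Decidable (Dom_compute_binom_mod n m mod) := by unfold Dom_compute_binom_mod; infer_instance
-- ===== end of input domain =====

-- B replaces A's interleaved multiply-then-floor-divide running product by two plain
-- product loops (numerator n-m+1..n, denominator m!) and one final exact division (simpler).

-- ===== PORT A =====
def compute_binom_mod (n : Int) (m : Int) (mod : Int) : Int :=
  if m == 0 then PySem.Int.mod 1 mod
  else
    let res := (PySem.List.pyRange 1 (m + 1) 1).foldl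
      (fun res i => PySem.Int.floordiv (res * (n - m + i)) i) 1
    PySem.Int.mod res mod

-- ===== PORT B =====
def compute_binom_mod_alt (n : Int) (m : Int) (mod : Int) : Int :=
  let num := (PySem.List.pyRange (n - m + 1) (n + 1) 1).foldl (fun a k => a * k) 1
  let den := (PySem.List.pyRange 1 (m + 1) 1).foldl (fun a k => a * k) 1
  PySem.Int.mod (PySem.Int.floordiv num den) mod

-- ===== PRECONDITION & SPEC =====
-- Pre_ excludes exactly mod = 0, on which Python's final '%' raises ZeroDivisionError in both A and B.
def Pre_compute_binom_mod (n : Int) (m : Int) (mod : Int) : Prop := mod ≠ 0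
instance (n : Int) (m : Int) (mod : Int) : Decidable (Pre_compute_binom_mod n m mod) := by unfold Pre_compute_binom_mod; infer_instance
def pvWitness_compute_binom_mod : Int × Int × Int := (7, 3, 5)

def Spec_compute_binom_mod (n : Int) (m : Int) (mod : Int) (out : Int) : Prop := out = compute_binom_mod_alt n m mod
instance (n : Int) (m : Int) (mod : Int) (out : Int) : Decidable (Spec_compute_binom_mod n m mod out) := by unfold Spec_compute_binom_mod; infer_instance

-- ===== CLAIM (what is proved, stated in full; the proofs are below) =====
def Claim_equal_compute_binom_mod : Prop := ∀ (n : Int) (m : Int) (mod : Int), Dom_compute_binom_mod n m mod → Pre_compute_binom_mod n m mod → Spec_compute_binom_mod n m mod (compute_binom_mod n m mod)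

-- ===== LEMMAS AND PROOFS =====

-- ∏_{j=1..k} (x + j)
def pvPochh (x : Int) : Nat → Int
  | 0 => 1
  | k + 1 => pvPochh x k * (x + (k + 1 : Nat))

-- A's loop as a structural recursion
def pvFloop (x : Int) : Nat → Int
  | 0 => 1
  | k + 1 => PySem.Int.floordiv (pvFloop x k * (x + (k + 1 : Nat))) ((k + 1 : Nat) : Int)

theorem pvPochh_eq_desc (x : Int) (k : Nat) :
    pvPochh x k = (descPochhammer ℤ k).eval (x + k) := by
  induction k with
  | zero => simp [pvPochh, descPochhammer]
  | succ k ih =>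
    rw [descPochhammer_succ_left]
    simp only [Polynomial.eval_mul, Polynomial.eval_X, Polynomial.eval_comp,
      Polynomial.eval_sub, Polynomial.eval_one]
    have : (x + ((k + 1 : Nat) : Int)) - 1 = x + k := by push_cast; ring
    rw [this, ← ih]
    simp [pvPochh]
    ring

theorem pvPochh_eq_factorial_mul_choose (x : Int) (k : Nat) :
    pvPochh x k = (k.factorial : Int) * Ring.choose (x + (k : Int)) k := by
  rw [pvPochh_eq_desc, Polynomial.eval_eq_smeval,
    Ring.descPochhammer_eq_factorial_smul_choose]
  simp

theorem pvChoose_step (x : Int) (k : Nat) :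
    Ring.choose (x + (k : Int)) k * (x + (k : Int) + 1)
      = ((k + 1 : Nat) : Int) * Ring.choose (x + ((k + 1 : Nat) : Int)) (k + 1) := by
  have h0 := pvPochh_eq_factorial_mul_choose x k
  have h1 := pvPochh_eq_factorial_mul_choose x (k + 1)
  have hrec : pvPochh x (k + 1) = pvPochh x k * (x + ((k + 1 : Nat) : Int)) := rfl
  have hfac : ((k + 1).factorial : Int) = (k.factorial : Int) * ((k + 1 : Nat) : Int) := by
    rw [Nat.factorial_succ]; push_cast; ring
  have hne : (k.factorial : Int) ≠ 0 := by exact_mod_cast Nat.factorial_ne_zero k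
  apply mul_left_cancel₀ hne
  calc (k.factorial : Int) * (Ring.choose (x + (k : Int)) k * (x + (k : Int) + 1))
      = pvPochh x k * (x + ((k + 1 : Nat) : Int)) := by rw [h0]; push_cast; ring
    _ = pvPochh x (k + 1) := hrec.symm
    _ = (k.factorial : Int) * (((k + 1 : Nat) : Int) * Ring.choose (x + ((k + 1 : Nat) : Int)) (k + 1)) := by
        rw [h1, hfac]; ring

theorem pvFloop_eq_choose (x : Int) (k : Nat) :
    pvFloop x k = Ring.choose (x + (k : Int)) k := by
  induction k with
  | zero => simp [pvFloop]
  | succ k ih =>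
    have hstep := pvChoose_step x k
    have hpos : (0 : Int) < ((k + 1 : Nat) : Int) := by positivity
    calc pvFloop x (k + 1)
        = PySem.Int.floordiv (Ring.choose (x + (k : Int)) k * (x + ((k + 1 : Nat) : Int))) ((k + 1 : Nat) : Int) := by
          rw [pvFloop, ih]
      _ = PySem.Int.floordiv (((k + 1 : Nat) : Int) * Ring.choose (x + ((k + 1 : Nat) : Int)) (k + 1)) ((k + 1 : Nat) : Int) := by
          rw [← hstep]; congr 1; push_cast; ring
      _ = Ring.choose (x + ((k + 1 : Nat) : Int)) (k + 1) := by
          rw [PySem.Int.floordiv_eq_ediv_of_pos hpos,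
            Int.mul_ediv_cancel_left _ (ne_of_gt hpos)]

-- A's foldl over range(1, k+1) is pvFloop
theorem pvFoldA (x : Int) (k : Nat) :
    (PySem.List.pyRange 1 ((k : Int) + 1) 1).foldl
      (fun res i => PySem.Int.floordiv (res * (x + i)) i) 1 = pvFloop x k := by
  induction k with
  | zero => simp [PySem.List.pyRange_one_eq_nil, pvFloop]
  | succ k ih =>
    have hsplit : PySem.List.pyRange 1 (((k + 1 : Nat) : Int) + 1) 1
        = PySem.List.pyRange 1 ((k : Int) + 1) 1 ++ [((k : Int) + 1)] := by
      have := PySem.List.pyRange_one_succ_right (show (1:Int) ≤ (k : Int) + 1 by omega)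
      rw [← this]; norm_cast
    rw [hsplit, List.foldl_append, ih]
    simp only [List.foldl_cons, List.foldl_nil, pvFloop]
    norm_cast

-- B's numerator foldl over range(x+1, x+k+1) is pvPochh
theorem pvFoldNum (x : Int) (k : Nat) :
    (PySem.List.pyRange (x + 1) (x + (k : Int) + 1) 1).foldl (fun a b => a * b) 1
      = pvPochh x k := by
  induction k with
  | zero => simp [PySem.List.pyRange_one_eq_nil, pvPochh]
  | succ k ih =>
    have hsplit : PySem.List.pyRange (x + 1) (x + ((k + 1 : Nat) : Int) + 1) 1
        = PySem.List.pyRange (x + 1) (x + (k : Int) + 1) 1 ++ [x + (k : Int) + 1] := by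
      have := PySem.List.pyRange_one_succ_right (show x + 1 ≤ x + (k : Int) + 1 by omega)
      rw [← this]; congr 1; push_cast; ring
    rw [hsplit, List.foldl_append, ih]
    simp only [List.foldl_cons, List.foldl_nil, pvPochh]
    push_cast; ring

-- B's denominator foldl over range(1, k+1) is k!
theorem pvFoldDen (k : Nat) :
    (PySem.List.pyRange 1 ((k : Int) + 1) 1).foldl (fun a b => a * b) 1
      = (k.factorial : Int) := by
  induction k with
  | zero => simp [PySem.List.pyRange_one_eq_nil, Nat.factorial]
  | succ k ih =>
    have hsplit : PySem.List.pyRange 1 (((k + 1 : Nat) : Int) + 1) 1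
        = PySem.List.pyRange 1 ((k : Int) + 1) 1 ++ [((k : Int) + 1)] := by
      have := PySem.List.pyRange_one_succ_right (show (1:Int) ≤ (k : Int) + 1 by omega)
      rw [← this]; norm_cast
    rw [hsplit, List.foldl_append, ih, Nat.factorial_succ]
    simp only [List.foldl_cons, List.foldl_nil]
    push_cast; ring

-- ===== VERDICT (by name: the statement is the Claim_ definition above) =====
theorem compute_binom_mod_spec : Claim_equal_compute_binom_mod := by
  intro n m mod _ _
  unfold Spec_compute_binom_mod compute_binom_mod compute_binom_mod_alt
  by_cases hm : 0 < m
  · -- m ≥ 1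
    obtain ⟨k, rfl⟩ : ∃ k : Nat, m = (k : Int) := ⟨m.toNat, by omega⟩
    have hm0 : (((k : Int)) == 0) = false := by simp; omega
    rw [hm0]
    simp only [Bool.false_eq_true, if_false]
    have h1 : n + 1 = (n - (k : Int)) + (k : Int) + 1 := by ring
    rw [h1, pvFoldNum (n - (k : Int)) k, pvFoldDen k, pvFoldA (n - (k : Int)) k,
      pvFloop_eq_choose, pvPochh_eq_factorial_mul_choose]
    have hpos : (0 : Int) < (k.factorial : Int) := by exact_mod_cast Nat.factorial_pos k
    rw [PySem.Int.floordiv_eq_ediv_of_pos hpos,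
      Int.mul_ediv_cancel_left _ (ne_of_gt hpos)]
  · -- m ≤ 0: both loops are over empty ranges, result 1 % mod
    have hA : PySem.List.pyRange 1 (m + 1) 1 = [] :=
      PySem.List.pyRange_one_eq_nil (by omega)
    have hN : PySem.List.pyRange (n - m + 1) (n + 1) 1 = [] :=
      PySem.List.pyRange_one_eq_nil (by omega)
    rw [hA, hN]
    by_cases h0 : m = 0
    · simp [h0, PySem.Int.floordiv]
    · have : (m == 0) = false := by simp [h0]
      rw [this]
      simp [PySem.Int.floordiv]
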